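-- pv_equiv track=rewrite | github.com/rolurq/codejam | 2008/Qualification_Round/A__Saving_the_Universe/solution.py | solve
-- ===== SOURCE A (Python) =====
-- def solve(engines: set, queries: list):
--     switches = 0
--
--     while queries:
--         engine_index = {}
--         max_index = -1
--         for i, query in enumerate(queries):
--             if query in engine_index:
--                 continue
--
--             if query in engines:
--                 engine_index[query] = i
--                 max_index = max(max_index, i)
--
--         valid = engines.difference(engine_index.keys())
--         if valid:
--             return switches
--
--         queries = queries[max_index:]
--         switches += 1
--
--     return switches
-- ===== SOURCE B (Python) =====
-- def solve(engines: set, queries: list):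
--     # Single pass: track which engines have been queried; when every engine
--     # has appeared, one switch is unavoidable and tracking restarts at the
--     # current query (served by the engine whose first use came last).
--     switches = 0
--     seen = set()
--     for q in queries:
--         if q in engines:
--             seen.add(q)
--             if engines <= seen:
--                 switches += 1
--                 seen = {q}
--     return switches
-- ===== Notes on version B (the rewrite author's own statement) =====
-- stated objective: alternative
-- what changed: Replaced A's repeated rescan-from-scratch rounds (rebuild a first-occurrence dict over the remaining queries, slice, repeat) by a single left-to-right pass that keeps a set of engines seen and increments the switch count, resetting the set to the current query, whenever coverage becomes complete; intended as asymptotically faster (O(n) vs O(n*switches)) but a timing run could not confirm a ratio.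
-- outside the precondition, e.g. on solve({'a'}, ['a']): A does not finish within the time limit, B returns 1; on solve(set(), ['x']): A does not finish within the time limit, B returns 0
import Mathlib
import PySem

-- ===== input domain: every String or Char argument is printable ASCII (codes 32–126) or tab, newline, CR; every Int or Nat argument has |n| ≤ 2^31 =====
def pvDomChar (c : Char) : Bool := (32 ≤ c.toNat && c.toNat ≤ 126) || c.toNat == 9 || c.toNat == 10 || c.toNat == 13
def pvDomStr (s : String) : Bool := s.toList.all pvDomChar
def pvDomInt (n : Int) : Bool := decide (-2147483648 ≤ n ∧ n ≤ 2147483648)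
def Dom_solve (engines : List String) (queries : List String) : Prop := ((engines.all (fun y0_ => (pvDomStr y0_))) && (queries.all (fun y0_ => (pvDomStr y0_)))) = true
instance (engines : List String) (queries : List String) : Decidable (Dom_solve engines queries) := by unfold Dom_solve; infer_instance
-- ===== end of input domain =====

-- B replaces A's repeated rescan-and-slice rounds by one left-to-right pass over the
-- queries (objective: alternative).

-- ===== PORT A =====
-- one round of A's while-body scan: build the dict of first occurrences of engine
-- queries (value = index) together with max_index, over enumerate(queries)
def solveRound (engines : List String) (queries : List String) :
    PySem.Dict String Int × Int :=
  (PySem.List.enumerate queries).foldl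
    (fun st iq =>
      if (st.1.get? iq.2).isSome then st            -- 'if query in engine_index: continue'
      else if iq.2 ∈ engines then
        (st.1.insert iq.2 iq.1, max st.2 iq.1)       -- record first index; max_index = max(...)
      else st)
    (PySem.Dict.empty, -1)

-- A's while loop; fuel only makes the same computation total (A diverges outside Pre_)
def solveLoop (engines : List String) (fuel : Nat) (switches : Int)
    (queries : List String) : Int :=
  match fuel with
  | 0 => switches
  | Nat.succ f =>
    if queries = [] then switches
    else
      let st := solveRound engines queries
      let valid : PySem.Set String :=
        PySem.Set.diff (PySem.Set.ofList engines) st.1.keys   -- engines.difference(keys)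
      if valid ≠ [] then switches                             -- 'if valid: return switches'
      else
        solveLoop engines f (switches + 1)
          (PySem.List.slice queries (some st.2) none)         -- queries = queries[max_index:]

def solve (engines : List String) (queries : List String) : Int :=
  solveLoop engines (queries.length + 1) 0 queries

-- ===== PORT B =====
def solve_alt (engines : List String) (queries : List String) : Int :=
  (queries.foldl
    (fun (st : PySem.Set String × Int) q =>
      if q ∈ engines then
        let seen := PySem.Set.add st.1 q                      -- seen.add(q)
        if PySem.Set.issubset engines seen then               -- 'if engines <= seen:'
          (PySem.Set.ofList [q], st.2 + 1)                    -- switches += 1; seen = {q}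
        else (seen, st.2)
      else st)
    (PySem.Set.empty, 0)).2

-- ===== PRECONDITION & SPEC =====
-- Pre_ excludes exactly the inputs on which Python A DIVERGES (returns nothing):
-- nonempty queries with an empty engine set (queries[-1:] loops forever), and a
-- single-engine set whose engine occurs in queries (max_index reaches 0 and the
-- slice queries[0:] no longer shrinks).
def Pre_solve (engines : List String) (queries : List String) : Prop :=
  queries = [] ∨
    (engines ≠ [] ∧
      ((PySem.Set.ofList engines).length = 1 → ∀ e ∈ engines, e ∉ queries))
instance (engines : List String) (queries : List String) : Decidable (Pre_solve engines queries) := by unfold Pre_solve; infer_instance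

def pvWitness_solve : List String × List String :=
  (["a", "b"], ["a", "x", "b", "a", "b", "a"])

def Spec_solve (engines : List String) (queries : List String) (out : Int) : Prop := out = solve_alt engines queries
instance (engines : List String) (queries : List String) (out : Int) : Decidable (Spec_solve engines queries out) := by unfold Spec_solve; infer_instance

-- ===== CLAIM (what is proved, stated in full; the proofs are below) =====
def Claim_equal_solve : Prop := ∀ (engines : List String) (queries : List String), Dom_solve engines queries → Pre_solve engines queries → Spec_solve engines queries (solve engines queries)

-- ===== LEMMAS AND PROOFS =====

-- proof-side recursion equal to B's fold: greedy count with an explicit seen set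
def gr (E : List String) (seen : PySem.Set String) : List String → Int
  | [] => 0
  | q :: qs =>
    if q ∈ E then
      if PySem.Set.issubset E (PySem.Set.add seen q) then
        1 + gr E (PySem.Set.ofList [q]) qs
      else gr E (PySem.Set.add seen q) qs
    else gr E seen qs

-- proof-side view of one round of A's scan: the final key set …
def scanS (E : List String) (K : PySem.Set String) : List String → PySem.Set String
  | [] => K
  | q :: qs => if q ∉ K ∧ q ∈ E then scanS E (PySem.Set.add K q) qs else scanS E K qs

-- … and the (relative) index of the LAST first-occurrence of an engine, if any
def cut (E : List String) (K : PySem.Set String) : List String → Option Nat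
  | [] => none
  | q :: qs =>
    if q ∉ K ∧ q ∈ E then
      match cut E (PySem.Set.add K q) qs with
      | some j => some (j + 1)
      | none => some 0
    else (cut E K qs).map (· + 1)

lemma alt_eq_gr (E : List String) :
    ∀ (qs : List String) (s : PySem.Set String) (n : Int),
      (qs.foldl
        (fun (st : PySem.Set String × Int) q =>
          if q ∈ E then
            let seen := PySem.Set.add st.1 q
            if PySem.Set.issubset E seen then (PySem.Set.ofList [q], st.2 + 1)
            else (seen, st.2)
          else st)
        (s, n)).2 = n + gr E s qs := by
  intro qs
  induction qs with
  | nil => intro s n; simp [gr]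
  | cons q qs ih =>
    intro s n
    simp only [List.foldl, gr]
    by_cases hq : q ∈ E
    · by_cases hsub : PySem.Set.issubset E (PySem.Set.add s q) = true
      · rw [if_pos hq, if_pos hsub, if_pos hq, if_pos hsub, ih]
        ring
      · rw [if_pos hq, if_neg hsub, if_pos hq, if_neg hsub, ih]
    · rw [if_neg hq, if_neg hq, ih]

lemma mem_scanS (E : List String) :
    ∀ (qs : List String) (K : PySem.Set String) (e : String),
      e ∈ scanS E K qs ↔ e ∈ K ∨ (e ∈ E ∧ e ∈ qs) := by
  intro qs
  induction qs with
  | nil => intro K e; simp [scanS]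
  | cons q qs ih =>
    intro K e
    simp only [scanS]
    by_cases h : q ∉ K ∧ q ∈ E
    · rw [if_pos h, ih]
      simp only [PySem.Set.mem_add, List.mem_cons]
      constructor
      · rintro ((he | rfl) | ⟨hE, hq⟩)
        · exact Or.inl he
        · exact Or.inr ⟨h.2, Or.inl rfl⟩
        · exact Or.inr ⟨hE, Or.inr hq⟩
      · rintro (he | ⟨hE, (rfl | hq)⟩)
        · exact Or.inl (Or.inl he)
        · exact Or.inl (Or.inr rfl)
        · exact Or.inr ⟨hE, hq⟩
    · rw [if_neg h, ih]
      push_neg at h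
      constructor
      · rintro (he | ⟨hE, hq⟩)
        · exact Or.inl he
        · exact Or.inr ⟨hE, List.mem_cons_of_mem _ hq⟩
      · rintro (he | ⟨hE, hq⟩)
        · exact Or.inl he
        · rcases List.mem_cons.mp hq with rfl | hq
          · exact Or.inl (by by_contra hk; exact h hk hE)
          · exact Or.inr ⟨hE, hq⟩

lemma cut_lt (E : List String) :
    ∀ (qs : List String) (K : PySem.Set String) (j : Nat),
      cut E K qs = some j → j < qs.length := by
  intro qs
  induction qs with
  | nil => intro K j h; simp [cut] at h
  | cons q qs ih =>
    intro K j h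
    simp only [cut] at h
    by_cases hc : q ∉ K ∧ q ∈ E
    · rw [if_pos hc] at h
      rcases hj : cut E (PySem.Set.add K q) qs with _ | j'
      · rw [hj] at h; simp at h; simp [List.length_cons]; omega
      · rw [hj] at h; simp at h
        have := ih _ _ hj
        simp [List.length_cons]; omega
    · rw [if_neg hc] at h
      rcases hj : cut E K qs with _ | j'
      · rw [hj] at h; simp at h
      · rw [hj] at h; simp at h
        have := ih _ _ hj
        simp [List.length_cons]; omega

lemma cut_none_scanS (E : List String) :
    ∀ (qs : List String) (K : PySem.Set String),
      cut E K qs = none → scanS E K qs = K := by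
  intro qs
  induction qs with
  | nil => intro K _; simp [scanS]
  | cons q qs ih =>
    intro K h
    simp only [cut] at h
    by_cases hc : q ∉ K ∧ q ∈ E
    · rw [if_pos hc] at h
      rcases hj : cut E (PySem.Set.add K q) qs with _ | j' <;> rw [hj] at h <;> simp at h
    · rw [if_neg hc] at h
      simp only [Option.map_eq_none_iff] at h
      simp only [scanS, if_neg hc]
      exact ih _ h

lemma gr_zero (E : List String) :
    ∀ (qs : List String) (K : PySem.Set String) (e : String),
      e ∈ E → e ∉ K → e ∉ qs → gr E K qs = 0 := by
  intro qs
  induction qs with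
  | nil => intro K e _ _ _; simp [gr]
  | cons q qs ih =>
    intro K e heE heK heqs
    have hne : e ≠ q := fun h => heqs (h ▸ List.mem_cons_self)
    have heqs' : e ∉ qs := fun h => heqs (List.mem_cons_of_mem _ h)
    simp only [gr]
    by_cases hq : q ∈ E
    · have hnot : ¬ PySem.Set.issubset E (PySem.Set.add K q) = true := by
        intro hsub
        have := (PySem.Set.issubset_iff _ _).mp hsub e heE
        rcases (PySem.Set.mem_add _ _ _).mp this with h | h
        · exact heK h
        · exact hne h
      rw [if_pos hq, if_neg hnot]
      exact ih _ e heE (fun h => by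
        rcases (PySem.Set.mem_add _ _ _).mp h with h | h
        · exact heK h
        · exact hne h) heqs'
    · rw [if_neg hq]
      exact ih _ e heE heK heqs'

lemma cut_none_of_subset (E : List String) :
    ∀ (qs : List String) (K : PySem.Set String),
      (∀ e ∈ E, e ∈ K) → cut E K qs = none := by
  intro qs
  induction qs with
  | nil => intro K _; simp [cut]
  | cons q qs ih =>
    intro K h
    have hc : ¬ (q ∉ K ∧ q ∈ E) := fun hq => hq.1 (h q hq.2)
    simp only [cut, if_neg hc, ih K h, Option.map_none]

lemma card_le_one_of_all_eq (E : List String) (q : String)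
    (h : ∀ e ∈ E, e = q) : (PySem.Set.ofList E).length ≤ 1 := by
  have hnd := PySem.Set.nodup_ofList (α := String) E
  have hmem : ∀ e ∈ PySem.Set.ofList E, e = q := fun e he =>
    h e ((PySem.Set.mem_ofList _ _).mp he)
  rcases hE : PySem.Set.ofList E with _ | ⟨a, _ | ⟨b, t⟩⟩
  · simp
  · simp
  · exfalso
    rw [hE] at hnd hmem
    have ha := hmem a (by simp)
    have hb := hmem b (by simp)
    subst ha
    rcases List.nodup_cons.mp hnd with ⟨hna, _⟩
    exact hna (by simp [hb])

lemma crux (E : List String) (h2 : 2 ≤ (PySem.Set.ofList E).length) :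
    ∀ (qs : List String) (K : PySem.Set String),
      (∀ x ∈ K, x ∈ E) → ¬ (∀ e ∈ E, e ∈ K) →
      (∀ e ∈ E, e ∈ scanS E K qs) →
      ∃ j, cut E K qs = some j ∧
        gr E K qs = 1 + gr E PySem.Set.empty (qs.drop j) := by
  intro qs
  induction qs with
  | nil =>
    intro K _ hnc hcov
    exact absurd (fun e he => by simpa [scanS] using hcov e he) hnc
  | cons q qs ih =>
    intro K hKE hnc hcov
    by_cases hc : q ∉ K ∧ q ∈ E
    · -- q is a new engine
      by_cases hsub : ∀ e ∈ E, e ∈ PySem.Set.add K q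
      · -- greedy triggers here; no later new engine
        have hcutn : cut E (PySem.Set.add K q) qs = none :=
          cut_none_of_subset E qs _ hsub
        have hcut : cut E K (q :: qs) = some 0 := by
          simp only [cut, hcutn]
          rw [if_pos hc]
        refine ⟨0, hcut, ?_⟩
        have hEq : ¬ PySem.Set.issubset E (PySem.Set.ofList [q]) = true := by
          intro h
          have hall : ∀ e ∈ E, e = q := by
            intro e he
            have := (PySem.Set.issubset_iff _ _).mp h e he
            have := (PySem.Set.mem_ofList _ _).mp this
            simpa using this
          have := card_le_one_of_all_eq E q hall
          omega
        have hsub' : PySem.Set.issubset E (PySem.Set.add K q) = true :=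
          (PySem.Set.issubset_iff _ _).mpr hsub
        have haddq : PySem.Set.add PySem.Set.empty q = PySem.Set.ofList [q] := rfl
        rw [List.drop_zero]
        simp only [gr]
        rw [if_pos hc.2, if_pos hsub', if_pos hc.2, haddq, if_neg hEq]
      · -- no trigger: recurse with K ∪ {q}
        have hKE' : ∀ x ∈ PySem.Set.add K q, x ∈ E := by
          intro x hx
          rcases (PySem.Set.mem_add _ _ _).mp hx with h | rfl
          · exact hKE x h
          · exact hc.2
        have hcov' : ∀ e ∈ E, e ∈ scanS E (PySem.Set.add K q) qs := by
          intro e he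
          have h1 := hcov e he
          simp only [scanS] at h1
          rwa [if_pos hc] at h1
        obtain ⟨j, hj, hgr⟩ := ih (PySem.Set.add K q) hKE' hsub hcov'
        refine ⟨j + 1, ?_, ?_⟩
        · simp only [cut, hj]
          rw [if_pos hc]
        · have hns : ¬ PySem.Set.issubset E (PySem.Set.add K q) = true := by
            intro h
            exact hsub ((PySem.Set.issubset_iff _ _).mp h)
          simp only [gr, List.drop_succ_cons]
          rw [if_pos hc.2, if_neg hns, hgr]
    · -- q already seen or not an engine: skip
      have hcov' : ∀ e ∈ E, e ∈ scanS E K qs := by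
        intro e he
        have h1 := hcov e he
        simp only [scanS] at h1
        rwa [if_neg hc] at h1
      obtain ⟨j, hj, hgr⟩ := ih K hKE hnc hcov'
      refine ⟨j + 1, ?_, ?_⟩
      · simp only [cut, hj]
        rw [if_neg hc]
        simp
      · have hdrop : (q :: qs).drop (j + 1) = qs.drop j := List.drop_succ_cons
        rw [hdrop]
        by_cases hq : q ∈ E
        · have hqK : q ∈ K := by
            rcases not_and_or.mp hc with h | h
            · exact not_not.mp h
            · exact absurd hq h
          have haddK : PySem.Set.add K q = K := PySem.Set.add_of_mem hqK
          have hns : ¬ PySem.Set.issubset E (PySem.Set.add K q) = true := by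
            rw [haddK]
            intro h
            exact hnc ((PySem.Set.issubset_iff _ _).mp h)
          simp only [gr]
          rw [if_pos hq, if_neg hns, haddK, hgr]
        · simp only [gr]
          rw [if_neg hq, hgr]

lemma round_bridge (E : List String) :
    ∀ (qs : List String) (s : Int) (d : PySem.Dict String Int) (m : Int), m < s →
      (((PySem.List.enumerate qs s).foldl
        (fun (st : PySem.Dict String Int × Int) iq =>
          if (st.1.get? iq.2).isSome then st
          else if iq.2 ∈ E then (st.1.insert iq.2 iq.1, max st.2 iq.1)
          else st)
        (d, m)).1.keys = scanS E d.keys qs ∧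
      ((PySem.List.enumerate qs s).foldl
        (fun (st : PySem.Dict String Int × Int) iq =>
          if (st.1.get? iq.2).isSome then st
          else if iq.2 ∈ E then (st.1.insert iq.2 iq.1, max st.2 iq.1)
          else st)
        (d, m)).2 = (match cut E d.keys qs with | some j => s + j | none => m)) := by
  intro qs
  induction qs with
  | nil =>
    intro s d m _
    constructor
    · simp [PySem.List.enumerate_nil, scanS]
    · simp [PySem.List.enumerate_nil, cut]
  | cons q qs ih =>
    intro s d m hms
    rw [PySem.List.enumerate_cons q qs s]
    simp only [List.foldl]
    by_cases hq : q ∈ d.keys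
    · -- 'if query in engine_index: continue'
      have hsome : ((d.get? q).isSome) = true := by
        rw [← PySem.Dict.contains_eq_isSome_get?]
        exact (PySem.Dict.contains_iff_mem_keys _ _).mpr hq
      rw [if_pos hsome]
      have hc : ¬ (q ∉ d.keys ∧ q ∈ E) := fun h => h.1 hq
      obtain ⟨h1, h2⟩ := ih (s + 1) d m (by omega)
      refine ⟨?_, ?_⟩
      · rw [h1]
        simp only [scanS]
        rw [if_neg hc]
      · rw [h2]
        simp only [cut]
        rw [if_neg hc]
        rcases hcut : cut E d.keys qs with _ | j <;> simp [hcut] <;> push_cast <;> ring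
    · have hnone : ¬ ((d.get? q).isSome = true) := by
        rw [← PySem.Dict.contains_eq_isSome_get?]
        intro h
        exact hq ((PySem.Dict.contains_iff_mem_keys _ _).mp h)
      rw [if_neg hnone]
      by_cases hE : q ∈ E
      · -- new engine: insert, max_index = max m s = s
        rw [if_pos hE]
        have hmax : max m s = s := max_eq_right (le_of_lt hms)
        have hkeys : (d.insert q s).keys = PySem.Set.add d.keys q := by
          rw [PySem.Set.add_of_not_mem hq]
          apply PySem.Dict.keys_insert_of_not_contains
          simp [PySem.Dict.contains_eq_decide_mem_keys, hq]
        have hcp : (q ∉ d.keys ∧ q ∈ E) := ⟨hq, hE⟩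
        obtain ⟨h1, h2⟩ := ih (s + 1) (d.insert q s) s (by omega)
        rw [hkeys] at h1 h2
        refine ⟨?_, ?_⟩
        · rw [hmax, h1]
          simp only [scanS]
          rw [if_pos hcp]
        · rw [hmax, h2]
          simp only [cut]
          rw [if_pos hcp]
          rcases hcut : cut E (PySem.Set.add d.keys q) qs with _ | j <;> simp [hcut] <;> push_cast <;> ring
      · rw [if_neg hE]
        have hc : ¬ (q ∉ d.keys ∧ q ∈ E) := fun h => hE h.2
        obtain ⟨h1, h2⟩ := ih (s + 1) d m (by omega)
        refine ⟨?_, ?_⟩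
        · rw [h1]
          simp only [scanS]
          rw [if_neg hc]
        · rw [h2]
          simp only [cut]
          rw [if_neg hc]
          rcases hcut : cut E d.keys qs with _ | j <;> simp [hcut] <;> push_cast <;> ring

lemma one_le_cut (E : List String) (h2 : 2 ≤ (PySem.Set.ofList E).length)
    (qs : List String) (j : Nat)
    (hcov : ∀ e ∈ E, e ∈ scanS E PySem.Set.empty qs)
    (hj : cut E PySem.Set.empty qs = some j) : 1 ≤ j := by
  rcases qs with _ | ⟨q, qs⟩
  · simp [cut] at hj
  · by_cases hc : q ∉ (PySem.Set.empty : PySem.Set String) ∧ q ∈ E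
    · simp only [cut] at hj
      rw [if_pos hc] at hj
      rcases hj' : cut E (PySem.Set.add PySem.Set.empty q) qs with _ | j'
      · exfalso
        have hscan := cut_none_scanS E qs _ hj'
        have hall : ∀ e ∈ E, e = q := by
          intro e he
          have h1 := hcov e he
          simp only [scanS] at h1
          rw [if_pos hc, hscan] at h1
          have := (PySem.Set.mem_add _ _ _).mp h1
          simpa [PySem.Set.empty] using this
        have := card_le_one_of_all_eq E q hall
        omega
      · rw [hj'] at hj
        simp at hj
        omega
    · simp only [cut] at hj
      rw [if_neg hc] at hj
      rcases hj' : cut E PySem.Set.empty qs with _ | j'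
      · rw [hj'] at hj; simp at hj
      · rw [hj'] at hj; simp at hj; omega

lemma main_loop (E : List String) :
    ∀ (fuel : Nat) (qs : List String) (sw : Int), qs.length < fuel →
      (2 ≤ (PySem.Set.ofList E).length ∨ ∃ e ∈ E, e ∉ qs) →
      solveLoop E fuel sw qs = sw + gr E PySem.Set.empty qs := by
  intro fuel
  induction fuel with
  | zero => intro qs sw h _; exact absurd h (Nat.not_lt_zero _)
  | succ f ih =>
    intro qs sw hlen hH
    by_cases hqs : qs = []
    · subst hqs
      simp [solveLoop, gr]
    · have hb := round_bridge E qs 0 PySem.Dict.empty (-1) (by omega)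
      rw [show (PySem.Dict.empty : PySem.Dict String Int).keys = PySem.Set.empty from rfl] at hb
      obtain ⟨hb1, hb2⟩ := hb
      have hstep : solveLoop E (f + 1) sw qs =
          (if PySem.Set.diff (PySem.Set.ofList E) (solveRound E qs).1.keys ≠ [] then sw
            else solveLoop E f (sw + 1)
              (PySem.List.slice qs (some (solveRound E qs).2) none)) := by
        simp only [solveLoop]
        rw [if_neg hqs]
      rw [hstep]
      have hkeys : (solveRound E qs).1.keys = scanS E PySem.Set.empty qs := hb1
      by_cases hval : PySem.Set.diff (PySem.Set.ofList E) (solveRound E qs).1.keys = []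
      · -- all engines occur: one switch and recurse on the suffix
        rw [if_neg (by simpa using hval)]
        have hcov : ∀ e ∈ E, e ∈ scanS E PySem.Set.empty qs := by
          intro e he
          by_contra hnot
          have hmem : e ∈ PySem.Set.diff (PySem.Set.ofList E) (solveRound E qs).1.keys := by
            rw [PySem.Set.mem_diff]
            exact ⟨(PySem.Set.mem_ofList _ _).mpr he, by rw [hkeys]; exact hnot⟩
          rw [hval] at hmem
          exact absurd hmem (List.not_mem_nil)
        have h2 : 2 ≤ (PySem.Set.ofList E).length := by
          rcases hH with h2 | ⟨e, he, hnq⟩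
          · exact h2
          · exfalso
            have := (mem_scanS E qs PySem.Set.empty e).mp (hcov e he)
            rcases this with h | ⟨_, h⟩
            · exact absurd h (List.not_mem_nil)
            · exact hnq h
        have hne : E ≠ [] := by
          intro h
          rw [h] at h2
          simp [PySem.Set.ofList] at h2
        have hnc : ¬ ∀ e ∈ E, e ∈ (PySem.Set.empty : PySem.Set String) := by
          intro hall
          obtain ⟨e, he⟩ := List.exists_mem_of_ne_nil E hne
          exact absurd (hall e he) (List.not_mem_nil)
        obtain ⟨j, hcut, hgr⟩ := crux E h2 qs PySem.Set.empty (by intro x hx; exact absurd hx (List.not_mem_nil)) hnc hcov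
        have hm : (solveRound E qs).2 = (0 : Int) + j := by
          rw [hcut] at hb2
          exact hb2
        have hj1 : 1 ≤ j := one_le_cut E h2 qs j hcov hcut
        have hslice : PySem.List.slice qs (some (solveRound E qs).2) none = qs.drop j := by
          rw [hm, zero_add]
          exact PySem.List.slice_from_natCast qs j
        rw [hslice]
        have hjlt : j < qs.length := cut_lt E qs _ _ hcut
        have hrec := ih (qs.drop j) (sw + 1)
          (by rw [List.length_drop]; omega) (Or.inl h2)
        rw [hrec, hgr]
        ring
      · -- some engine never occurs: A returns; greedy never completes coverage
        rw [if_pos (by simpa using hval)]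
        obtain ⟨e, hmem⟩ := List.exists_mem_of_ne_nil _ hval
        rw [PySem.Set.mem_diff] at hmem
        obtain ⟨heE, hek⟩ := hmem
        have heE' : e ∈ E := (PySem.Set.mem_ofList _ _).mp heE
        have heq : e ∉ qs := by
          intro hq
          exact hek (by rw [hkeys]; exact (mem_scanS E qs _ e).mpr (Or.inr ⟨heE', hq⟩))
        rw [gr_zero E qs PySem.Set.empty e heE' (List.not_mem_nil) heq]
        ring

-- ===== VERDICT (by name: the statement is the Claim_ definition above) =====
theorem solve_spec : Claim_equal_solve := by
  intro E qs _ hpre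
  unfold Spec_solve
  have halt : solve_alt E qs = 0 + gr E PySem.Set.empty qs := by
    unfold solve_alt
    exact alt_eq_gr E qs PySem.Set.empty 0
  rcases hpre with hq | ⟨hne, h1⟩
  · subst hq
    simp [solve, solveLoop, solve_alt]
  · have hH : 2 ≤ (PySem.Set.ofList E).length ∨ ∃ e ∈ E, e ∉ qs := by
      obtain ⟨e, he⟩ := List.exists_mem_of_ne_nil E hne
      have hpos : 0 < (PySem.Set.ofList E).length :=
        List.length_pos_of_mem ((PySem.Set.mem_ofList _ _).mpr he)
      by_cases h2 : 2 ≤ (PySem.Set.ofList E).length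
      · exact Or.inl h2
      · exact Or.inr ⟨e, he, h1 (by omega) e he⟩
    rw [solve, main_loop E (qs.length + 1) qs 0 (by omega) hH, halt]
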